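-- pv_equiv track=rewrite | github.com/Rick10119/PyPSA-China | examples/LS/Ls.py | categorize_materials
-- ===== SOURCE A (Python) =====
-- def categorize_materials(materials):
--     """
--     将产品分为四类：
--     1. Upstream raw materials - 上游原材料
--     2. Primary products - 初级产品
--     3. Downstream raw materials - 下游原材料
--     4. Downstream products - 下游产品
--
--     返回一个字典，包含四个分类的产品列表
--     """
--     categories = {
--         "Upstream raw materials": [],
--         "Primary products": [],
--         "Downstream raw materials": [],
--         "Downstream products": []
--     }
--
--     # 根据config.py中的分类来分组产品
--     for i, material in enumerate(materials):
--         if i < 8:  # 前8个是上游原材料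
--             categories["Upstream raw materials"].append(material)
--         elif i < 13:  # 接下来5个是初级产品
--             categories["Primary products"].append(material)
--         elif i < 14:  # 接下来1个是下游原材料
--             categories["Downstream raw materials"].append(material)
--         else:  # 剩余的是下游产品
--             categories["Downstream products"].append(material)
--
--     return categories
-- ===== SOURCE B (Python) =====
-- def categorize_materials(materials):
--     materials = list(materials)
--     return {
--         "Upstream raw materials": materials[:8],
--         "Primary products": materials[8:13],
--         "Downstream raw materials": materials[13:14],
--         "Downstream products": materials[14:],
--     }
-- ===== Notes on version B (the rewrite author's own statement) =====
-- stated objective: simpler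
-- what changed: Replaces the enumerate loop with cascading index comparisons and per-element appends by building the dict directly from four fixed slices.
import Mathlib
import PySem

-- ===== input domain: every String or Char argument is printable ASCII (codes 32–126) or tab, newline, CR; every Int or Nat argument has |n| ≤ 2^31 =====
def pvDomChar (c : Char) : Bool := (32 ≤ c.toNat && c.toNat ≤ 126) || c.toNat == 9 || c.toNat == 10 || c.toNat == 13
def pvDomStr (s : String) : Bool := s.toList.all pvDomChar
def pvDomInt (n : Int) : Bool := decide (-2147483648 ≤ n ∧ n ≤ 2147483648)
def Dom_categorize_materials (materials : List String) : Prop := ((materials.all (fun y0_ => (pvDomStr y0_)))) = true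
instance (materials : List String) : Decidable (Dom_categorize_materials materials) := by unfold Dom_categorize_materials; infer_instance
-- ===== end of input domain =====

-- B replaces A's enumerate loop with four fixed slices; objective: simpler.

-- ===== PORT A =====
def categorize_materials (materials : List String) : List (String × List String) :=
  ((PySem.List.enumerate materials 0).foldl (fun d p =>
      if p.1 < 8 then d.modify "Upstream raw materials" [] (· ++ [p.2])
      else if p.1 < 13 then d.modify "Primary products" [] (· ++ [p.2])
      else if p.1 < 14 then d.modify "Downstream raw materials" [] (· ++ [p.2])
      else d.modify "Downstream products" [] (· ++ [p.2]))
    (PySem.Dict.ofList [("Upstream raw materials", []), ("Primary products", []),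
                        ("Downstream raw materials", []), ("Downstream products", [])])).items

-- ===== PORT B =====
def categorize_materials_alt (materials : List String) : List (String × List String) :=
  [("Upstream raw materials", PySem.List.slice materials none (some 8)),
   ("Primary products", PySem.List.slice materials (some 8) (some 13)),
   ("Downstream raw materials", PySem.List.slice materials (some 13) (some 14)),
   ("Downstream products", PySem.List.slice materials (some 14) none)]

-- ===== PRECONDITION & SPEC =====
def Spec_categorize_materials (materials : List String) (out : List (String × List String)) : Prop := out = categorize_materials_alt materials
instance (materials : List String) (out : List (String × List String)) : Decidable (Spec_categorize_materials materials out) := by unfold Spec_categorize_materials; infer_instance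

-- ===== CLAIM (what is proved, stated in full; the proofs are below) =====
def Claim_equal_categorize_materials : Prop := ∀ (materials : List String), Dom_categorize_materials materials → Spec_categorize_materials materials (categorize_materials materials)

-- ===== LEMMAS AND PROOFS =====

-- elements of ms whose global index (start k) lies in [lo, hi)
def pvSeg (lo hi : Nat) : Nat → List String → List String
  | _, [] => []
  | k, m :: ms => (if lo ≤ k ∧ k < hi then [m] else []) ++ pvSeg lo hi (k+1) ms

-- elements of ms whose global index (start k) is ≥ lo
def pvSegGe (lo : Nat) : Nat → List String → List String
  | _, [] => []
  | k, m :: ms => (if lo ≤ k then [m] else []) ++ pvSegGe lo (k+1) ms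

theorem pvSeg_eq (lo hi : Nat) : ∀ (k : Nat) (ms : List String),
    pvSeg lo hi k ms = (ms.drop (lo - k)).take (hi - max lo k) := by
  intro k ms
  induction ms generalizing k with
  | nil => simp [pvSeg]
  | cons m ms ih =>
    simp only [pvSeg, ih (k+1)]
    by_cases h1 : lo ≤ k ∧ k < hi
    · have e0 : lo - k = 0 := by omega
      have e1 : lo - (k+1) = 0 := by omega
      have e2 : hi - k = (hi - max lo (k+1)) + 1 := by omega
      simp [h1, e0, e1, e2]
    · by_cases h2 : lo ≤ k
      · have e2 : hi - max lo k = 0 := by omega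
        have e3 : hi - max lo (k+1) = 0 := by omega
        simp [h1, e2, e3]
      · have e0 : lo - k = (lo - (k+1)) + 1 := by omega
        have e1 : max lo k = lo := by omega
        have e2 : max lo (k+1) = lo := by omega
        simp [h1, e0, e1, e2]

theorem pvSegGe_eq (lo : Nat) : ∀ (k : Nat) (ms : List String),
    pvSegGe lo k ms = ms.drop (lo - k) := by
  intro k ms
  induction ms generalizing k with
  | nil => simp [pvSegGe]
  | cons m ms ih =>
    simp only [pvSegGe, ih (k+1)]
    by_cases h : lo ≤ k
    · have e0 : lo - k = 0 := by omega
      have e1 : lo - (k+1) = 0 := by omega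
      simp [h, e0, e1]
    · have e0 : lo - k = (lo - (k+1)) + 1 := by omega
      simp [h, e0]

-- evaluating one modify step on the literal four-key dict
theorem pvModU (a b c d : List String) (m : String) :
    (PySem.Dict.mk [("Upstream raw materials", a), ("Primary products", b),
      ("Downstream raw materials", c), ("Downstream products", d)]).modify
      "Upstream raw materials" [] (· ++ [m]) =
    PySem.Dict.mk [("Upstream raw materials", a ++ [m]), ("Primary products", b),
      ("Downstream raw materials", c), ("Downstream products", d)] := by
  simp [PySem.Dict.modify, PySem.Dict.contains, PySem.Dict.getD, PySem.Dict.get?, PySem.Dict.insert]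

theorem pvModP (a b c d : List String) (m : String) :
    (PySem.Dict.mk [("Upstream raw materials", a), ("Primary products", b),
      ("Downstream raw materials", c), ("Downstream products", d)]).modify
      "Primary products" [] (· ++ [m]) =
    PySem.Dict.mk [("Upstream raw materials", a), ("Primary products", b ++ [m]),
      ("Downstream raw materials", c), ("Downstream products", d)] := by
  simp [PySem.Dict.modify, PySem.Dict.contains, PySem.Dict.getD, PySem.Dict.get?, PySem.Dict.insert]

theorem pvModD (a b c d : List String) (m : String) :
    (PySem.Dict.mk [("Upstream raw materials", a), ("Primary products", b),
      ("Downstream raw materials", c), ("Downstream products", d)]).modify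
      "Downstream raw materials" [] (· ++ [m]) =
    PySem.Dict.mk [("Upstream raw materials", a), ("Primary products", b),
      ("Downstream raw materials", c ++ [m]), ("Downstream products", d)] := by
  simp [PySem.Dict.modify, PySem.Dict.contains, PySem.Dict.getD, PySem.Dict.get?, PySem.Dict.insert]

theorem pvModQ (a b c d : List String) (m : String) :
    (PySem.Dict.mk [("Upstream raw materials", a), ("Primary products", b),
      ("Downstream raw materials", c), ("Downstream products", d)]).modify
      "Downstream products" [] (· ++ [m]) =
    PySem.Dict.mk [("Upstream raw materials", a), ("Primary products", b),
      ("Downstream raw materials", c), ("Downstream products", d ++ [m])] := by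
  simp [PySem.Dict.modify, PySem.Dict.contains, PySem.Dict.getD, PySem.Dict.get?, PySem.Dict.insert]

theorem pvFold_eq : ∀ (ms : List String) (k : Nat) (a b c d : List String),
    ((PySem.List.enumerate ms (k : Int)).foldl (fun d p =>
      if p.1 < 8 then d.modify "Upstream raw materials" [] (· ++ [p.2])
      else if p.1 < 13 then d.modify "Primary products" [] (· ++ [p.2])
      else if p.1 < 14 then d.modify "Downstream raw materials" [] (· ++ [p.2])
      else d.modify "Downstream products" [] (· ++ [p.2]))
      (PySem.Dict.mk [("Upstream raw materials", a), ("Primary products", b),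
                      ("Downstream raw materials", c), ("Downstream products", d)])) =
    PySem.Dict.mk [("Upstream raw materials", a ++ pvSeg 0 8 k ms),
                   ("Primary products", b ++ pvSeg 8 13 k ms),
                   ("Downstream raw materials", c ++ pvSeg 13 14 k ms),
                   ("Downstream products", d ++ pvSegGe 14 k ms)] := by
  intro ms
  induction ms with
  | nil => intro k a b c d; simp [PySem.List.enumerate_nil, pvSeg, pvSegGe]
  | cons m ms ih =>
    intro k a b c d
    rw [PySem.List.enumerate_cons]
    have hk1 : ((k : Int) + 1) = ((k + 1 : Nat) : Int) := by push_cast; ring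
    simp only [List.foldl_cons, hk1]
    by_cases h8 : k < 8
    · rw [if_pos (show ((k : Int)) < 8 by exact_mod_cast h8), pvModU, ih (k+1)]
      have c1 : 0 ≤ k ∧ k < 8 := by omega
      have c2 : ¬(8 ≤ k ∧ k < 13) := by omega
      have c3 : ¬(13 ≤ k ∧ k < 14) := by omega
      have c4 : ¬(14 ≤ k) := by omega
      simp [pvSeg, pvSegGe, c1, c2, c3, c4]
    · by_cases h13 : k < 13
      · rw [if_neg (show ¬((k : Int)) < 8 by exact_mod_cast h8),
           if_pos (show ((k : Int)) < 13 by exact_mod_cast h13), pvModP, ih (k+1)]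
        have c1 : ¬(0 ≤ k ∧ k < 8) := by omega
        have c2 : 8 ≤ k ∧ k < 13 := by omega
        have c3 : ¬(13 ≤ k ∧ k < 14) := by omega
        have c4 : ¬(14 ≤ k) := by omega
        simp [pvSeg, pvSegGe, c2, c3, c4]
      · by_cases h14 : k < 14
        · rw [if_neg (show ¬((k : Int)) < 8 by exact_mod_cast h8),
             if_neg (show ¬((k : Int)) < 13 by exact_mod_cast h13),
             if_pos (show ((k : Int)) < 14 by exact_mod_cast h14), pvModD, ih (k+1)]
          have c1 : ¬(0 ≤ k ∧ k < 8) := by omega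
          have c2 : ¬(8 ≤ k ∧ k < 13) := by omega
          have c3 : 13 ≤ k ∧ k < 14 := by omega
          have c4 : ¬(14 ≤ k) := by omega
          simp [pvSeg, pvSegGe, c2, c3, c4]
          all_goals omega
        · rw [if_neg (show ¬((k : Int)) < 8 by exact_mod_cast h8),
             if_neg (show ¬((k : Int)) < 13 by exact_mod_cast h13),
             if_neg (show ¬((k : Int)) < 14 by exact_mod_cast h14), pvModQ, ih (k+1)]
          have c1 : ¬(0 ≤ k ∧ k < 8) := by omega
          have c2 : ¬(8 ≤ k ∧ k < 13) := by omega
          have c3 : ¬(13 ≤ k ∧ k < 14) := by omega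
          have c4 : 14 ≤ k := by omega
          simp [pvSeg, pvSegGe, c2, c3, c4]
          all_goals omega

-- ===== VERDICT (by name: the statement is the Claim_ definition above) =====
theorem categorize_materials_spec : Claim_equal_categorize_materials := by
  intro materials _
  unfold Spec_categorize_materials categorize_materials categorize_materials_alt
  rw [show PySem.Dict.ofList [("Upstream raw materials", ([] : List String)),
      ("Primary products", []), ("Downstream raw materials", []),
      ("Downstream products", [])] = PySem.Dict.mk [("Upstream raw materials", []),
      ("Primary products", []), ("Downstream raw materials", []),
      ("Downstream products", [])] from by decide,
     show (0 : Int) = ((0 : Nat) : Int) from rfl, pvFold_eq materials 0]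
  simp only [show (8 : Int) = ((8 : Nat) : Int) from rfl,
    show (13 : Int) = ((13 : Nat) : Int) from rfl, show (14 : Int) = ((14 : Nat) : Int) from rfl,
    PySem.List.slice_to_natCast, PySem.List.slice_natCast, PySem.List.slice_from_natCast,
    pvSeg_eq, pvSegGe_eq]
  norm_num
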